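-- pv_equiv track=rewrite | github.com/periclesmiranda/METALProject | Meta-Learning/Meta-Learner/suggestion/SingleSolutionSuggester.py | _suggest_operators
-- ===== SOURCE A (Python) =====
-- def _suggest_operators(features, operators_table, problems, n_suggestions, n_problems):
--     resultant_ops = [];
--     for i in range(0, len(features)):
--         filtered_operators = filter(lambda op: op[0] == features[i][0], operators_table);
--
--         if problems[0] == "min":
--             operators = sorted(filtered_operators, key=lambda x: x[-1])
--         if problems[0] == "max":
--             operators = sorted(filtered_operators, key=lambda x: x[-1], reverse=True)
--
--         if n_problems == None:
--             resultant_ops.append(operators[:1][0]);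
--         elif n_problems == 1:
--             resultant_ops = operators[:n_suggestions];
--
--     return resultant_ops;
-- ===== SOURCE B (Python) =====
-- def _suggest_operators(features, operators_table, problems, n_suggestions, n_problems):
--     if not features:
--         return []
--     groups = {}
--     for op in operators_table:
--         groups.setdefault(op[0], []).append(op)
--     reverse = problems[0] == "max"
--     ranked = {k: sorted(v, key=lambda x: x[-1], reverse=reverse) for k, v in groups.items()}
--     if n_problems is None:
--         return [ranked[f[0]][0] for f in features]
--     if n_problems == 1:
--         return ranked.get(features[-1][0], [])[:n_suggestions]
--     return []
-- ===== Notes on version B (the rewrite author's own statement) =====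
-- stated objective: alternative
-- what changed: B groups operators_table by op[0] into a dict once and sorts each group once, answering each feature by a lookup, instead of re-filtering and re-sorting the whole table per feature; for n_problems==1 it uses only the last feature, which is all that survives A's reassignment loop.
-- outside the precondition, e.g. on _suggest_operators([[1]], [[]], ['x'], 2, 0): A returns [], B raises IndexError; on _suggest_operators([[]], [], ['min'], 1, 1): A returns [], B raises IndexError
import Mathlib
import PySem

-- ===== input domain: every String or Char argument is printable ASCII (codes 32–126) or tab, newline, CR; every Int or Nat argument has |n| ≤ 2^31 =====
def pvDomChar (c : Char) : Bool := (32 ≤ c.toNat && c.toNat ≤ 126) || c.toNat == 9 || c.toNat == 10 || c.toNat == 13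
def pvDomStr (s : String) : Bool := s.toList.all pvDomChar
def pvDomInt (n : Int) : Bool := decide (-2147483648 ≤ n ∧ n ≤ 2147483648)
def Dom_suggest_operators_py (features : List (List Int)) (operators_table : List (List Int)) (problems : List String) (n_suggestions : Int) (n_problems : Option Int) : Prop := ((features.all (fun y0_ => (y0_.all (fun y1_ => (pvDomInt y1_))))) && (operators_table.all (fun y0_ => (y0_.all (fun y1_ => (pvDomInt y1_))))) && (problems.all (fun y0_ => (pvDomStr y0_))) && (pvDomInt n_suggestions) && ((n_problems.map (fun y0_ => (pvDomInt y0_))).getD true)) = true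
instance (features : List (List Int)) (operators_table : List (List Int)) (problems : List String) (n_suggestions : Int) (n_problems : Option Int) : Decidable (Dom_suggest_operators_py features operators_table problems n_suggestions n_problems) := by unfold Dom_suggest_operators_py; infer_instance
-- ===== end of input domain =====

-- B groups operators_table by op[0] once and sorts each group once (dict + lookups)
-- instead of A's per-feature re-filter + re-sort of the whole table (objective: alternative).


-- ===== PORT A =====
-- key=lambda x: x[-1]  (rows reaching a sort are nonempty: the filter already read op[0])
def pvKeyLast (x : List Int) : Int := (PySem.List.pyGet? x (-1)).getD 0
-- op[0] / f[0]  (rows are nonempty under Pre_ wherever this is evaluated)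
def pvHead0 (x : List Int) : Int := PySem.List.pyGetD x 0 0

-- 'for i in range(0, len(features))' whose body uses only features[i]: structural
-- recursion over features carrying the loop state resultant_ops (= acc).
def pvALoop (operators_table : List (List Int)) (problems : List String) (n_suggestions : Int) (n_problems : Option Int) : List (List Int) → List (List Int) → List (List Int)
  | acc, [] => acc
  | acc, f :: rest =>
      let filtered := operators_table.filter (fun op => pvHead0 op == pvHead0 f)
      let operators :=
        if PySem.List.pyGetD problems 0 "" = "min" then PySem.List.sorted filtered pvKeyLast false
        else if PySem.List.pyGetD problems 0 "" = "max" then PySem.List.sorted filtered pvKeyLast true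
        else []   -- Python: 'operators' undefined (NameError) when it would be read; Pre_ excludes that
      let acc' :=
        match n_problems with
        | none => acc ++ [PySem.List.pyGetD (PySem.List.slice operators none (some 1)) 0 []]  -- operators[:1][0]
        | some k => if k = 1 then PySem.List.slice operators none (some n_suggestions) else acc
      pvALoop operators_table problems n_suggestions n_problems acc' rest

def suggest_operators_py (features : List (List Int)) (operators_table : List (List Int)) (problems : List String) (n_suggestions : Int) (n_problems : Option Int) : List (List Int) :=
  pvALoop operators_table problems n_suggestions n_problems [] features

-- ===== PORT B =====
def suggest_operators_py_alt (features : List (List Int)) (operators_table : List (List Int)) (problems : List String) (n_suggestions : Int) (n_problems : Option Int) : List (List Int) :=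
  if features = [] then []
  else
    -- groups.setdefault(op[0], []).append(op)
    let groups := operators_table.foldl (fun d op => d.modify (pvHead0 op) [] (· ++ [op])) PySem.Dict.empty
    let rev := PySem.List.pyGetD problems 0 "" == "max"
    -- ranked = {k: sorted(v, key=lambda x: x[-1], reverse=reverse) for k, v in groups.items()}
    let ranked := PySem.Dict.mk (groups.items.map (fun p => (p.1, PySem.List.sorted p.2 pvKeyLast rev)))
    match n_problems with
    | none => features.map (fun f => PySem.List.pyGetD (ranked.getD (pvHead0 f) []) 0 [])
    | some k =>
        if k = 1 then
          PySem.List.slice (ranked.getD (pvHead0 (PySem.List.pyGetD features (-1) [])) []) none (some n_suggestions)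
        else []

-- ===== PRECONDITION & SPEC =====
-- Pre_ excludes (a) inputs where A raises (empty problems with features present; problems[0]
-- outside {"min","max"} when the undefined 'operators' would be read; an empty sorted group
-- indexed by [0]) and (b) inputs with an empty operator/feature row that A never inspects only
-- because its lazy filter is left unconsumed, while B's eager grouping reads op[0]/f[0] and raises.
def Pre_suggest_operators_py (features : List (List Int)) (operators_table : List (List Int)) (problems : List String) (n_suggestions : Int) (n_problems : Option Int) : Prop :=
  features = [] ∨
    (problems ≠ [] ∧
     (∀ f ∈ features, f ≠ []) ∧
     (∀ op ∈ operators_table, op ≠ []) ∧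
     ((n_problems = none ∨ n_problems = some 1) →
        (problems.headD "" = "min" ∨ problems.headD "" = "max")) ∧
     (n_problems = none →
        ∀ f ∈ features, ∃ op ∈ operators_table, op.headD 0 = f.headD 0))
instance (features : List (List Int)) (operators_table : List (List Int)) (problems : List String) (n_suggestions : Int) (n_problems : Option Int) : Decidable (Pre_suggest_operators_py features operators_table problems n_suggestions n_problems) := by unfold Pre_suggest_operators_py; infer_instance

def pvWitness_suggest_operators_py : List (List Int) × List (List Int) × List String × Int × Option Int :=
  ([[1, 5], [2, 7]], [[1, 9], [2, 3], [1, 4]], ["min"], 2, none)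

def Spec_suggest_operators_py (features : List (List Int)) (operators_table : List (List Int)) (problems : List String) (n_suggestions : Int) (n_problems : Option Int) (out : List (List Int)) : Prop := out = suggest_operators_py_alt features operators_table problems n_suggestions n_problems
instance (features : List (List Int)) (operators_table : List (List Int)) (problems : List String) (n_suggestions : Int) (n_problems : Option Int) (out : List (List Int)) : Decidable (Spec_suggest_operators_py features operators_table problems n_suggestions n_problems out) := by unfold Spec_suggest_operators_py; infer_instance

-- ===== CLAIM (what is proved, stated in full; the proofs are below) =====
def Claim_equal_suggest_operators_py : Prop := ∀ (features : List (List Int)) (operators_table : List (List Int)) (problems : List String) (n_suggestions : Int) (n_problems : Option Int), Dom_suggest_operators_py features operators_table problems n_suggestions n_problems → Pre_suggest_operators_py features operators_table problems n_suggestions n_problems → Spec_suggest_operators_py features operators_table problems n_suggestions n_problems (suggest_operators_py features operators_table problems n_suggestions n_problems)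

-- ===== LEMMAS AND PROOFS =====

-- the dict B folds up holds, at each key, exactly the filtered list A rebuilds per feature
theorem pv_groups_getD (operators_table : List (List Int)) (c : Int) :
    (operators_table.foldl (fun d op => d.modify (pvHead0 op) [] (· ++ [op])) PySem.Dict.empty).getD c []
      = operators_table.filter (fun op => pvHead0 op == c) := by
  have h := PySem.Dict.getD_foldl_modify_append (l := operators_table.map (fun op => (pvHead0 op, op))) (d := PySem.Dict.empty) (c := c)
  rw [List.foldl_map] at h
  simpa [List.filter_map, Function.comp_def, List.map_map] using h

-- getD through a value-mapped dict (f [] = [] handles the missing-key default)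
theorem pv_mapVal_getD (f : List (List Int) → List (List Int)) (hf : f [] = [])
    (items : List (Int × List (List Int))) (k : Int) :
    (PySem.Dict.mk (items.map (fun p => (p.1, f p.2)))).getD k []
      = f ((PySem.Dict.mk items).getD k []) := by
  induction items with
  | nil => simpa [PySem.Dict.getD_eq_get?_getD, PySem.Dict.get?] using hf.symm
  | cons a t ih =>
      obtain ⟨ka, va⟩ := a
      simp only [List.map_cons, PySem.Dict.getD_eq_get?_getD, PySem.Dict.get?_mk_cons] at ih ⊢
      by_cases h : ka == k <;> simp [h, ih]

-- B's 'ranked' lookup, in closed form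
theorem pv_ranked_getD (operators_table : List (List Int)) (rev : Bool) (c : Int) :
    (PySem.Dict.mk ((operators_table.foldl (fun d op => d.modify (pvHead0 op) [] (· ++ [op])) PySem.Dict.empty).items.map
        (fun p => (p.1, PySem.List.sorted p.2 pvKeyLast rev)))).getD c []
      = PySem.List.sorted (operators_table.filter (fun op => pvHead0 op == c)) pvKeyLast rev := by
  rw [pv_mapVal_getD (fun v => PySem.List.sorted v pvKeyLast rev) rfl, ← pv_groups_getD operators_table c]

-- the 'operators' A computes per feature (named so the loop lemmas can speak about it)
def pvStepOps (operators_table : List (List Int)) (problems : List String) (f : List Int) : List (List Int) :=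
  if PySem.List.pyGetD problems 0 "" = "min" then PySem.List.sorted (operators_table.filter (fun op => pvHead0 op == pvHead0 f)) pvKeyLast false
  else if PySem.List.pyGetD problems 0 "" = "max" then PySem.List.sorted (operators_table.filter (fun op => pvHead0 op == pvHead0 f)) pvKeyLast true
  else []

-- when problems[0] ∈ {min, max}, A's two-branch sort is one sort with reverse = (problems[0] == "max")
theorem pv_stepOps_eq (operators_table : List (List Int)) (problems : List String)
    (hP : problems.headD "" = "min" ∨ problems.headD "" = "max") (f : List Int) :
    pvStepOps operators_table problems f
      = PySem.List.sorted (operators_table.filter (fun op => pvHead0 op == pvHead0 f)) pvKeyLast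
          (PySem.List.pyGetD problems 0 "" == "max") := by
  have hg : PySem.List.pyGetD problems 0 "" = problems.headD "" := by
    cases problems with
    | nil => rfl
    | cons a l => simp [PySem.List.pyGetD_zero]
  rcases hP with h | h <;> (unfold pvStepOps; rw [hg, h]) <;> simp

theorem pv_take1_get (l : List (List Int)) :
    PySem.List.pyGetD (PySem.List.slice l none (some 1)) 0 [] = PySem.List.pyGetD l 0 [] := by
  rw [PySem.List.slice_to (xs := l) (b := 1) (by norm_num)]
  cases l <;> simp [PySem.List.pyGetD_zero]

theorem pv_loop_none (t : List (List Int)) (p : List String) (ns : Int) :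
    ∀ (fs : List (List Int)) (acc : List (List Int)),
      pvALoop t p ns none acc fs
        = acc ++ fs.map (fun f => PySem.List.pyGetD (PySem.List.slice (pvStepOps t p f) none (some 1)) 0 []) := by
  intro fs
  induction fs with
  | nil => intro acc; simp [pvALoop]
  | cons f rest ih => intro acc; simp [pvALoop, ih, pvStepOps]

theorem pv_loop_one (t : List (List Int)) (p : List String) (ns : Int) :
    ∀ (fs : List (List Int)) (h : fs ≠ []) (acc : List (List Int)),
      pvALoop t p ns (some 1) acc fs
        = PySem.List.slice (pvStepOps t p (fs.getLast h)) none (some ns) := by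
  intro fs
  induction fs with
  | nil => intro h; exact absurd rfl h
  | cons f rest ih =>
      intro h acc
      cases rest with
      | nil => simp [pvALoop, pvStepOps]
      | cons g rs =>
          rw [List.getLast_cons (by simp),
              ← ih (by simp) (PySem.List.slice (pvStepOps t p f) none (some ns))]
          rfl

theorem pv_loop_other (t : List (List Int)) (p : List String) (ns : Int) (k : Int) (hk : k ≠ 1) :
    ∀ (fs : List (List Int)) (acc : List (List Int)),
      pvALoop t p ns (some k) acc fs = acc := by
  intro fs
  induction fs with
  | nil => intro acc; simp [pvALoop]
  | cons f rest ih => intro acc; simp [pvALoop, hk, ih]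

theorem suggest_operators_py_spec : Claim_equal_suggest_operators_py := by
  intro features operators_table problems n_suggestions n_problems _hDom hPre
  unfold Spec_suggest_operators_py
  by_cases hfe : features = []
  · subst hfe; simp [suggest_operators_py, pvALoop, suggest_operators_py_alt]
  rcases hPre with h | ⟨_hp, _hf, _hop, hminmax, _hmatch⟩
  · exact absurd h hfe
  unfold suggest_operators_py suggest_operators_py_alt
  simp only [hfe, if_false]
  cases n_problems with
  | none =>
      rw [pv_loop_none]
      simp only [List.nil_append]
      refine List.map_congr_left (fun f _ => ?_)
      rw [pv_ranked_getD, ← pv_stepOps_eq operators_table problems (hminmax (Or.inl rfl)) f, pv_take1_get]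
  | some k =>
      by_cases hk : k = 1
      · subst hk
        rw [pv_loop_one operators_table problems n_suggestions features hfe]
        rw [pv_ranked_getD, ← pv_stepOps_eq operators_table problems (hminmax (Or.inr rfl)) _,
            PySem.List.pyGetD_neg_one (h := hfe)]
        simp
      · rw [pv_loop_other operators_table problems n_suggestions k hk]
        simp [hk]
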